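-- pv_equiv track=rewrite | github.com/folkol/adventofcode | 2017/day24/a.py | bridges
-- ===== SOURCE A (Python) =====
-- def bridges(components, current=[], conn='0'):
--     for component in components:
--         fst, snd = component
--         if fst == conn:
--             out = snd
--         elif snd == conn:
--             out = fst
--         else:
--             continue
--
--         bridge = current + [component]
--         yield bridge
--         yield from bridges([c for c in components if c != component], bridge, out)
-- ===== SOURCE B (Python) =====
-- def bridges(components, current=[], conn='0'):
--     # iterative pre-order DFS with an explicit stack of frames instead of recursion
--     stack = [("expand", components, current, conn)]
--     while stack:
--         frame = stack.pop()
--         if frame[0] == "yield":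
--             yield frame[1]
--             continue
--         _, comps, cur, c = frame
--         new = []
--         for component in comps:
--             fst, snd = component
--             if fst == c:
--                 out = snd
--             elif snd == c:
--                 out = fst
--             else:
--                 continue
--             bridge = cur + [component]
--             new.append(("yield", bridge))
--             new.append(("expand", [x for x in comps if x != component], bridge, out))
--         stack.extend(reversed(new))
-- ===== Notes on version B (the rewrite author's own statement) =====
-- stated objective: alternative
-- what changed: The recursive generator is replaced by an iterative stack machine: a worklist of yield/expand frames popped in order, pushing each match's yield frame and child expand frame (in reverse) so the identical pre-order sequence of bridges is produced without recursion.
import Mathlib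
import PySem

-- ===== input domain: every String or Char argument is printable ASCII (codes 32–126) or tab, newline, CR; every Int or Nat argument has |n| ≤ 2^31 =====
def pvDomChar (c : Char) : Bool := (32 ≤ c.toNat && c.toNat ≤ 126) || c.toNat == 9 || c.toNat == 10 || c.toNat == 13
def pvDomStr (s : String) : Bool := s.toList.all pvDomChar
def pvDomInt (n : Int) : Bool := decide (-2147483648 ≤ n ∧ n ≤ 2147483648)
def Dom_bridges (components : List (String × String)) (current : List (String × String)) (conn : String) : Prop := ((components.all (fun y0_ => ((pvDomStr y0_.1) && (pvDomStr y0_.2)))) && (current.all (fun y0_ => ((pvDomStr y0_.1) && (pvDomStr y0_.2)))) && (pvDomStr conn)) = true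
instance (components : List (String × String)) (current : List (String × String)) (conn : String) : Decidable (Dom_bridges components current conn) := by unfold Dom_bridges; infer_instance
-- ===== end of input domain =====

-- B replaces A's recursive generator by an explicit stack-machine DFS (same pre-order yield order); objective: alternative decomposition.
-- Both ports return the list of all values the Python generator yields.

-- ===== PORT A =====
-- recursive generator: for each matching component yield current+[component] and recurse on the value-filtered remainder
def bridges (components : List (String × String)) (current : List (String × String)) (conn : String) : List (List (String × String)) :=
  components.attach.flatMap (fun x =>
    let component := x.1
    if component.1 = conn then
      let bridge := current ++ [component]
      bridge :: bridges (components.filter (fun c => c ≠ component)) bridge component.2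
    else if component.2 = conn then
      let bridge := current ++ [component]
      bridge :: bridges (components.filter (fun c => c ≠ component)) bridge component.1
    else [])
termination_by components.length
decreasing_by
  all_goals
    rw [List.length_unattach, show components.length = components.attach.length from (List.length_attach ..).symm]
    refine List.length_filter_lt_length_iff_exists.mpr ⟨x, List.mem_attach _ _, ?_⟩
    simp

-- ===== PORT B =====
-- a stack frame: either a pending yield of a bridge, or a pending expansion (comps, cur, conn)
inductive PvFrame : Type
  | yld : List (String × String) → PvFrame
  | expand : List (String × String) → List (String × String) → String → PvFrame
deriving DecidableEq, Repr

-- the frames pushed when an expand frame is popped (B's inner for-loop, in yield order)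
def pvChildren (comps : List (String × String)) (cur : List (String × String)) (conn : String) : List PvFrame :=
  comps.attach.flatMap (fun x =>
    let component := x.1
    if component.1 = conn then
      let bridge := cur ++ [component]
      [PvFrame.yld bridge, PvFrame.expand (comps.filter (fun c => c ≠ component)) bridge component.2]
    else if component.2 = conn then
      let bridge := cur ++ [component]
      [PvFrame.yld bridge, PvFrame.expand (comps.filter (fun c => c ≠ component)) bridge component.1]
    else [])

-- termination measure for the stack machine
def pvW : Nat → Nat
  | 0 => 1
  | n + 1 => (n + 1) * (pvW n + 1) + 1

def pvFW : PvFrame → Nat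
  | .yld _ => 1
  | .expand comps _ _ => pvW comps.length

theorem pvW_mono {m n : Nat} (h : m ≤ n) : pvW m ≤ pvW n := by
  induction n with
  | zero => simp_all
  | succ k ih =>
    by_cases hm : m = k + 1
    · subst hm; exact Nat.le_refl _
    · have hk : m ≤ k := by omega
      have h2 : pvW k + 1 ≤ (k + 1) * (pvW k + 1) :=
        Nat.le_mul_of_pos_left _ (Nat.succ_pos k)
      have h3 := ih hk
      show pvW m ≤ (k + 1) * (pvW k + 1) + 1
      omega

theorem pv_sum_flatMap_le {α : Type} (l : List α) (f : α → List Nat) (B : Nat)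
    (h : ∀ x ∈ l, (f x).sum ≤ B) : ((l.flatMap f).sum ≤ l.length * B) := by
  induction l with
  | nil => simp
  | cons a t ih =>
    have ha := h a (by simp)
    have ht := ih (fun x hx => h x (by simp [hx]))
    simp only [List.flatMap_cons, List.sum_append, List.length_cons, Nat.succ_mul]
    omega

theorem pvChildren_sum (comps : List (String × String)) (cur : List (String × String)) (conn : String) :
    ((pvChildren comps cur conn).map pvFW).sum < pvW comps.length := by
  have key : (((pvChildren comps cur conn).map pvFW)).sum
      ≤ comps.attach.length * (pvW (comps.length - 1) + 1) := by
    unfold pvChildren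
    rw [List.map_flatMap]
    apply pv_sum_flatMap_le
    intro x hx
    have hlen : (comps.filter (fun c => decide (c ≠ x.1))).length < comps.length :=
      List.length_filter_lt_length_iff_exists.mpr ⟨x.1, x.2, by simp⟩
    have hmono := pvW_mono (Nat.le_sub_one_of_lt hlen)
    dsimp only
    split_ifs <;>
      simp only [List.map_cons, List.map_nil, List.sum_cons, List.sum_nil, pvFW] <;>
      omega
  rw [List.length_attach] at key
  cases hn : comps.length with
  | zero =>
    rw [hn] at key
    simp only [Nat.zero_mul] at key
    have h0 : pvW 0 = 1 := rfl
    omega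
  | succ m =>
    rw [hn] at key
    simp only [Nat.add_sub_cancel] at key
    have h1 : pvW (m + 1) = (m + 1) * (pvW m + 1) + 1 := rfl
    omega

-- B's stack machine: pop the top frame; a yield frame emits its bridge, an expand frame pushes its children
def pvRun : List PvFrame → List (List (String × String))
  | [] => []
  | .yld b :: rest => b :: pvRun rest
  | .expand comps cur conn :: rest => pvRun (pvChildren comps cur conn ++ rest)
termination_by stack => (stack.map pvFW).sum
decreasing_by
  · simp [pvFW]
  · have h := pvChildren_sum comps cur conn
    simp only [List.map_append, List.sum_append, List.map_cons, List.sum_cons, pvFW]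
    omega

def bridges_alt (components : List (String × String)) (current : List (String × String)) (conn : String) : List (List (String × String)) :=
  pvRun [PvFrame.expand components current conn]

-- ===== PRECONDITION & SPEC =====
def Spec_bridges (components : List (String × String)) (current : List (String × String)) (conn : String) (out : List (List (String × String))) : Prop := out = bridges_alt components current conn
instance (components : List (String × String)) (current : List (String × String)) (conn : String) (out : List (List (String × String))) : Decidable (Spec_bridges components current conn out) := by unfold Spec_bridges; infer_instance

-- ===== CLAIM (what is proved, stated in full; the proofs are below) =====
def Claim_equal_bridges : Prop := ∀ (components : List (String × String)) (current : List (String × String)) (conn : String), Dom_bridges components current conn → Spec_bridges components current conn (bridges components current conn)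

-- ===== LEMMAS AND PROOFS =====

-- denotation of a frame: what the machine will emit for it
def pvSem : PvFrame → List (List (String × String))
  | .yld b => [b]
  | .expand c cu co => bridges c cu co

theorem pvChildren_flatMap_sem (comps : List (String × String)) (cur : List (String × String)) (conn : String) :
    (pvChildren comps cur conn).flatMap pvSem = bridges comps cur conn := by
  conv_rhs => rw [bridges]
  unfold pvChildren
  rw [List.flatMap_assoc]
  refine congrArg (fun f => List.flatMap f comps.attach) (funext fun x => ?_)
  dsimp only
  split_ifs <;> simp [pvSem]

theorem pvRun_eq (stack : List PvFrame) : pvRun stack = stack.flatMap pvSem := by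
  induction stack using pvRun.induct with
  | case1 => simp [pvRun]
  | case2 b rest ih => simp [pvRun, pvSem, ih]
  | case3 comps cur conn rest ih =>
    rw [pvRun, ih, List.flatMap_append, pvChildren_flatMap_sem]
    simp [pvSem]

-- ===== VERDICT (by name: the statement is the Claim_ definition above) =====
theorem bridges_spec : Claim_equal_bridges := by
  intro components current conn _
  unfold Spec_bridges bridges_alt
  rw [pvRun_eq]
  simp [pvSem]
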